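-- pv_equiv track=rewrite | github.com/bramleyccslab/hexcraft | python/solver.py | move_northeast
-- ===== SOURCE A (Python) =====
-- BOARD_SIZE = 9
--
-- def move_northeast(shape):
--     for i in range(len(shape)):
--         x, y = shape[i]
--         q, r = offset_to_axial(x, y)
--         q += 1
--         r -= 1
--         shape[i] = axial_to_offset(q, r)
--     return shape
--
-- def offset_to_axial(x, y):
--     if x <= BOARD_SIZE // 2:
--         q = y - x
--     else:
--         q = y - BOARD_SIZE // 2
--     r = x - BOARD_SIZE // 2
--     return q, r
--
-- def axial_to_offset(q, r):
--     x = r + BOARD_SIZE // 2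
--     if x <= BOARD_SIZE // 2:
--         y = q + r + BOARD_SIZE // 2
--     else:
--         y = q + BOARD_SIZE // 2
--     return x, y
-- ===== SOURCE B (Python) =====
-- def move_northeast(shape):
--     # Net effect of offset_to_axial -> (q+1, r-1) -> axial_to_offset:
--     # x decreases by 1; y stays when x <= 4 and gains 1 when x >= 5.
--     shape[:] = [(x - 1, y) if x <= 4 else (x - 1, y + 1) for x, y in shape]
--     return shape
-- ===== Notes on version B (the rewrite author's own statement) =====
-- stated objective: simpler
-- what changed: Replaced the per-cell round-trip through offset_to_axial/axial_to_offset with the derived closed-form tuple (x-1, y or y+1) applied in one list comprehension; the two coordinate-conversion helpers disappear.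
import Mathlib
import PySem

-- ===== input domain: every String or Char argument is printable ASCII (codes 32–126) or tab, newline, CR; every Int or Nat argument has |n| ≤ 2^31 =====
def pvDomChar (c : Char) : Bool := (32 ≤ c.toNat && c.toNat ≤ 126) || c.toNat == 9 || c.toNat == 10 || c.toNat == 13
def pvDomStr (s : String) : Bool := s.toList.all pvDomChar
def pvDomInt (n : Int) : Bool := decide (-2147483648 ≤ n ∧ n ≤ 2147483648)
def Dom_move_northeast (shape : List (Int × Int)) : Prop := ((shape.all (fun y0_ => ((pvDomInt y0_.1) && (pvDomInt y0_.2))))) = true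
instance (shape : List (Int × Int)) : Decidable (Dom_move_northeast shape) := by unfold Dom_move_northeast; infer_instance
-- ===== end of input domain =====

-- B inlines the derived closed-form shift instead of the axial round-trip; mutation of
-- the argument list in Python is matched in Source B (shape[:] = ...), equivalence is about the return value.
-- ===== PORT A =====
def offset_to_axial (x y : Int) : Int × Int :=
  let q := if x ≤ 9 / 2 then y - x else y - 9 / 2
  let r := x - 9 / 2
  (q, r)

def axial_to_offset (q r : Int) : Int × Int :=
  let x := r + 9 / 2
  let y := if x ≤ 9 / 2 then q + r + 9 / 2 else q + 9 / 2
  (x, y)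

def move_northeast : List (Int × Int) → List (Int × Int)
  | [] => []
  | (x, y) :: rest =>
    let (q, r) := offset_to_axial x y
    axial_to_offset (q + 1) (r - 1) :: move_northeast rest

-- ===== PORT B =====
def move_northeast_alt (shape : List (Int × Int)) : List (Int × Int) :=
  shape.map (fun p => if p.1 ≤ 4 then (p.1 - 1, p.2) else (p.1 - 1, p.2 + 1))

-- ===== PRECONDITION & SPEC =====
def Spec_move_northeast (shape : List (Int × Int)) (out : List (Int × Int)) : Prop := out = move_northeast_alt shape
instance (shape : List (Int × Int)) (out : List (Int × Int)) : Decidable (Spec_move_northeast shape out) := by unfold Spec_move_northeast; infer_instance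

-- ===== CLAIM (what is proved, stated in full; the proofs are below) =====
def Claim_equal_move_northeast : Prop := ∀ (shape : List (Int × Int)), Dom_move_northeast shape → Spec_move_northeast shape (move_northeast shape)

-- ===== LEMMAS AND PROOFS =====
theorem move_northeast_eq_alt (shape : List (Int × Int)) :
    move_northeast shape = move_northeast_alt shape := by
  induction shape with
  | nil => rfl
  | cons p rest ih =>
    obtain ⟨x, y⟩ := p
    simp only [move_northeast, move_northeast_alt, List.map, offset_to_axial, axial_to_offset,
      List.cons.injEq] at *
    refine ⟨?_, ih⟩
    split_ifs <;> simp_all <;> omega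

-- ===== VERDICT (by name: the statement is the Claim_ definition above) =====
theorem move_northeast_spec : Claim_equal_move_northeast :=
  fun shape _ => move_northeast_eq_alt shape
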